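-- pv_equiv track=rewrite | github.com/pauloALuis/LP | SeriesDeProblemas1/questaoteste.py | calc_lower_vocals
-- ===== SOURCE A (Python) =====
-- def calc_lower_vocals(s: str):
--     i = 0
--     vocals = ["a", "e", "i", "o", "u"]
--     for char in s:
--         for vocal in vocals:
--             if char == vocal:
--                 i +=1
--     return i
-- ===== SOURCE B (Python) =====
-- def calc_lower_vocals(s: str):
--     # Build a character-frequency table in one pass, then sum five lookups.
--     freq = {}
--     for ch in s:
--         freq[ch] = freq.get(ch, 0) + 1
--     return sum(freq.get(v, 0) for v in ("a", "e", "i", "o", "u"))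
-- ===== Notes on version B (the rewrite author's own statement) =====
-- stated objective: faster
-- what changed: Replaces the per-character nested vowel loop with a single frequency-table (dict) tabulation pass followed by five constant-time vowel lookups.
import Mathlib
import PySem

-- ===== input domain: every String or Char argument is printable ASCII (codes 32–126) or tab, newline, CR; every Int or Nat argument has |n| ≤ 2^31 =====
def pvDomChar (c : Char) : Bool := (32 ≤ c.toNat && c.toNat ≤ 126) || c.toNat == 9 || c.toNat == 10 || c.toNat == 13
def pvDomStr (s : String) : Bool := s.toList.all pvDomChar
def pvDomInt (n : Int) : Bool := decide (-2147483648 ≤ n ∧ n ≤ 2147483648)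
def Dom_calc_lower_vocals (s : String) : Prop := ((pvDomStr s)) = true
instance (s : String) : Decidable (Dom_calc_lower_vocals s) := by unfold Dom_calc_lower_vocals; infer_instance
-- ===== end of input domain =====

-- B builds a character-frequency table in one pass and sums five vowel lookups,
-- instead of A's nested per-character vowel loop (constant-factor faster: one pass plus five lookups).


-- ===== PORT A =====
-- for char in s: for vocal in vocals: if char == vocal: i += 1
def calc_lower_vocals (s : String) : Int :=
  s.toList.foldl
    (fun i ch =>
      ['a', 'e', 'i', 'o', 'u'].foldl
        (fun i vocal => if ch == vocal then i + 1 else i) i)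
    0

-- ===== PORT B =====
-- freq = {}; for ch in s: freq[ch] = freq.get(ch,0)+1; sum(freq.get(v,0) for v in vowels)
def calc_lower_vocals_alt (s : String) : Int :=
  let freq : PySem.Dict Char Int :=
    s.toList.foldl (fun d x => d.insert x (d.getD x 0 + 1)) PySem.Dict.empty
  ['a', 'e', 'i', 'o', 'u'].foldl (fun acc v => acc + freq.getD v 0) 0

-- ===== PRECONDITION & SPEC =====
def Spec_calc_lower_vocals (s : String) (out : Int) : Prop := out = calc_lower_vocals_alt s
instance (s : String) (out : Int) : Decidable (Spec_calc_lower_vocals s out) := by unfold Spec_calc_lower_vocals; infer_instance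

-- ===== CLAIM (what is proved, stated in full; the proofs are below) =====
def Claim_equal_calc_lower_vocals : Prop := ∀ (s : String), Dom_calc_lower_vocals s → Spec_calc_lower_vocals s (calc_lower_vocals s)

-- ===== LEMMAS AND PROOFS =====

-- A's nested loop counts, over the whole list, the occurrences of each vowel.
theorem calc_A_foldl (l : List Char) (acc : Int) :
    l.foldl
      (fun i ch =>
        ['a', 'e', 'i', 'o', 'u'].foldl
          (fun i vocal => if ch == vocal then i + 1 else i) i)
      acc
    = acc + ((l.count 'a' : Int) + l.count 'e' + l.count 'i' + l.count 'o' + l.count 'u') := by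
  induction l generalizing acc with
  | nil => simp
  | cons ch l ih =>
    rw [List.foldl_cons, ih]
    simp only [List.count_cons]
    by_cases ha : ch = 'a' <;> by_cases he : ch = 'e' <;> by_cases hi : ch = 'i' <;>
      by_cases ho : ch = 'o' <;> by_cases hu : ch = 'u' <;>
      simp_all <;> ring

-- ===== VERDICT (by name: the statement is the Claim_ definition above) =====
theorem calc_lower_vocals_spec : Claim_equal_calc_lower_vocals := by
  intro s _
  unfold Spec_calc_lower_vocals calc_lower_vocals calc_lower_vocals_alt
  rw [calc_A_foldl]
  simp only [PySem.Dict.foldl_insert_getD_add_one_eq_counter, List.foldl,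
    PySem.Dict.getD_counter]
  ring
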